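-- pv_equiv track=rewrite | github.com/Janani-N14/Speaky- | spell.py | _compare_letters
-- ===== SOURCE A (Python) =====
-- def _compare_letters(text1, text2):
--     """Compare letters between two texts."""
--     text1 = text1.lower().replace(" ", "")
--     text2 = text2.lower().replace(" ", "")
--
--     mismatched = []
--     for i, letter in enumerate(text1):
--         if i >= len(text2) or letter != text2[i]:
--             mismatched.append(letter)
--
--     if len(text2) > len(text1):
--         mismatched.extend(text2[len(text1):])
--
--     return mismatched
-- ===== SOURCE B (Python) =====
-- def _compare_letters(text1, text2):
--     a = text1.lower().replace(" ", "")
--     b = text2.lower().replace(" ", "")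
--     out = []
--     i, j = len(a), len(b)
--     while i > 0 or j > 0:
--         if j > i:
--             j -= 1
--             out.append(b[j])
--         elif i > j:
--             i -= 1
--             out.append(a[i])
--         else:
--             i -= 1
--             j -= 1
--             if a[i] != b[j]:
--                 out.append(a[i])
--     out.reverse()
--     return out
-- ===== Notes on version B (the rewrite author's own statement) =====
-- stated objective: alternative
-- what changed: Replaces A's forward index loop with its in-range test plus a separate tail-extension branch by a single backward while-loop over two cursors that consumes the longer string's tail first and the aligned pairs next, appending in reverse and reversing the buffer once at the end.
import Mathlib
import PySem

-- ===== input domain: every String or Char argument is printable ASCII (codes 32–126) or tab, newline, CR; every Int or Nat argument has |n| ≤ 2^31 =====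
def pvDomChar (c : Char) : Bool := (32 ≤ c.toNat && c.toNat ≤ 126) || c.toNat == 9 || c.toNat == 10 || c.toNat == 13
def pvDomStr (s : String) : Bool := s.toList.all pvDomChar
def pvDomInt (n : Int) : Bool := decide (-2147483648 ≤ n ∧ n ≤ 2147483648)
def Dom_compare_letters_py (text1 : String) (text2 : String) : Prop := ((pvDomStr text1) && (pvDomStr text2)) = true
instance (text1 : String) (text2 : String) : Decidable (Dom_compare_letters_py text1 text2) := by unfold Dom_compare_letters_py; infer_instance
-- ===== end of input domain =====

-- B replaces A's forward index loop + separate tail-extension branch by one backward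
-- two-cursor while-loop that appends in reverse and reverses the buffer once (alternative decomposition, same cost).

-- ===== PORT A =====
def compare_letters_py (text1 : String) (text2 : String) : List String :=
  let t1 := (PySem.Str.replace (PySem.Str.lower text1) " " "").toList
  let t2 := (PySem.Str.replace (PySem.Str.lower text2) " " "").toList
  let mismatched := (PySem.List.enumerate t1 0).foldl
    (fun acc p =>
      if ((t2.length : Int) ≤ p.1) ∨ p.2 ≠ PySem.List.pyGetD t2 p.1 ' '
      then acc ++ [String.singleton p.2] else acc) []
  if t2.length > t1.length then
    mismatched ++ (PySem.List.slice t2 (some (t1.length : Int)) none).map String.singleton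
  else mismatched

-- ===== PORT B =====
-- the 'while i > 0 or j > 0' loop of Source B, state (i, j, out); terminates since i + j decreases
def altLoop (a b : List Char) (i j : Nat) (out : List String) : List String :=
  if i < j then
    altLoop a b i (j - 1) (out ++ [String.singleton (PySem.List.pyGetD b ((j : Int) - 1) ' ')])
  else if j < i then
    altLoop a b (i - 1) j (out ++ [String.singleton (PySem.List.pyGetD a ((i : Int) - 1) ' ')])
  else if 0 < i then
    altLoop a b (i - 1) (j - 1)
      (if PySem.List.pyGetD a ((i : Int) - 1) ' ' ≠ PySem.List.pyGetD b ((j : Int) - 1) ' '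
       then out ++ [String.singleton (PySem.List.pyGetD a ((i : Int) - 1) ' ')] else out)
  else out
termination_by i + j
decreasing_by all_goals omega

def compare_letters_py_alt (text1 : String) (text2 : String) : List String :=
  let a := (PySem.Str.replace (PySem.Str.lower text1) " " "").toList
  let b := (PySem.Str.replace (PySem.Str.lower text2) " " "").toList
  (altLoop a b a.length b.length []).reverse

-- ===== PRECONDITION & SPEC =====
def Spec_compare_letters_py (text1 : String) (text2 : String) (out : List String) : Prop := out = compare_letters_py_alt text1 text2
instance (text1 : String) (text2 : String) (out : List String) : Decidable (Spec_compare_letters_py text1 text2 out) := by unfold Spec_compare_letters_py; infer_instance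

-- ===== CLAIM (what is proved, stated in full; the proofs are below) =====
def Claim_equal_compare_letters_py : Prop := ∀ (text1 : String) (text2 : String), Dom_compare_letters_py text1 text2 → Spec_compare_letters_py text1 text2 (compare_letters_py text1 text2)

-- ===== LEMMAS AND PROOFS =====

-- canonical value both ports are reduced to: positional mismatches on the common prefix, then the tails
def mism (x y : List Char) : List String :=
  ((x.zip y).filter (fun p => p.1 ≠ p.2)).map (fun p => String.singleton p.1)
  ++ (x.drop (min x.length y.length)).map String.singleton
  ++ (y.drop (min x.length y.length)).map String.singleton

lemma zip_take_of_le {α β : Type} (x : List α) (y : List β) (n : Nat) (h : x.length ≤ n) :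
    x.zip (y.take n) = x.zip y := by
  induction x generalizing y n with
  | nil => simp
  | cons a xs ih =>
    cases y with
    | nil => simp
    | cons b ys =>
      cases n with
      | zero => simp at h
      | succ m => simp at h ⊢; exact ih ys m h

lemma zip_take_of_le' {α β : Type} (x : List α) (y : List β) (n : Nat) (h : y.length ≤ n) :
    (x.take n).zip y = x.zip y := by
  induction x generalizing y n with
  | nil => simp
  | cons a xs ih =>
    cases y with
    | nil => simp
    | cons b ys =>
      cases n with
      | zero => simp at h
      | succ m => simp at h ⊢; exact ih ys m h

-- A's loop over enumerate, generalized over the start index s and accumulator.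
lemma loopA (l2 : List Char) (l1 : List Char) (s : Nat) (acc : List String) :
    (PySem.List.enumerate l1 (s : Int)).foldl
      (fun acc p =>
        if ((l2.length : Int) ≤ p.1) ∨ p.2 ≠ PySem.List.pyGetD l2 p.1 ' '
        then acc ++ [String.singleton p.2] else acc) acc
    = acc ++ ((l1.zip (l2.drop s)).filter (fun p => p.1 ≠ p.2)).map (fun p => String.singleton p.1)
          ++ (l1.drop (l2.length - s)).map String.singleton := by
  induction l1 generalizing s acc with
  | nil => simp [PySem.List.enumerate_nil]
  | cons c rest ih =>
    rw [PySem.List.enumerate_cons]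
    have hcast : (s : Int) + 1 = ((s + 1 : Nat) : Int) := by push_cast; ring
    by_cases h : l2.length ≤ s
    · have hz : l2.drop s = [] := List.drop_eq_nil_of_le h
      have hz' : l2.drop (s + 1) = [] := List.drop_eq_nil_of_le (by omega)
      have h0 : l2.length - s = 0 := by omega
      have h0' : l2.length - (s + 1) = 0 := by omega
      have hcond : ((l2.length : Int) ≤ (s : Int)) := by exact_mod_cast h
      simp only [List.foldl_cons, if_pos (Or.inl hcond), hcast, ih]
      simp [hz, hz', h0, h0']
    · rw [not_le] at h
      have hget : PySem.List.pyGetD l2 (s : Int) ' ' = l2[s] := by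
        rw [PySem.List.pyGetD_natCast]; simp [List.getD, h]
      have hdrop : l2.drop s = l2[s] :: l2.drop (s + 1) := List.drop_eq_getElem_cons h
      have hsub : l2.length - s = (l2.length - (s + 1)) + 1 := by omega
      have hcond : ¬ ((l2.length : Int) ≤ (s : Int)) := by exact_mod_cast not_le.mpr h
      by_cases hc : c = l2[s]
      · rw [List.foldl_cons]
        simp only [if_neg (show ¬((l2.length : Int) ≤ ((s : Int)) ∨ c ≠ PySem.List.pyGetD l2 ((s : Int)) ' ') from
          not_or.mpr ⟨hcond, by rw [hget]; exact not_not_intro hc⟩), hcast, ih]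
        conv_rhs => rw [hdrop, hsub]
        simp only [List.zip_cons_cons, List.filter_cons, List.drop_succ_cons]
        simp [hc]
      · rw [List.foldl_cons]
        simp only [if_pos (show (l2.length : Int) ≤ ((s : Int)) ∨ c ≠ PySem.List.pyGetD l2 ((s : Int)) ' ' from
          Or.inr (by rw [hget]; exact hc)), hcast, ih]
        conv_rhs => rw [hdrop, hsub]
        simp only [List.zip_cons_cons, List.filter_cons, List.drop_succ_cons]
        simp [hc]

-- A's port equals the canonical value on the (already normalized) character lists.
lemma A_eq_mism (l1 l2 : List Char) :
    (if l2.length > l1.length then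
      ((PySem.List.enumerate l1 0).foldl
        (fun acc p =>
          if ((l2.length : Int) ≤ p.1) ∨ p.2 ≠ PySem.List.pyGetD l2 p.1 ' '
          then acc ++ [String.singleton p.2] else acc) [])
        ++ (PySem.List.slice l2 (some (l1.length : Int)) none).map String.singleton
    else
      (PySem.List.enumerate l1 0).foldl
        (fun acc p =>
          if ((l2.length : Int) ≤ p.1) ∨ p.2 ≠ PySem.List.pyGetD l2 p.1 ' '
          then acc ++ [String.singleton p.2] else acc) [])
    = mism l1 l2 := by
  have h0 : ((0 : Nat) : Int) = (0 : Int) := rfl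
  unfold mism
  rw [← h0, loopA]
  by_cases h : l2.length > l1.length
  · have hmin : min l1.length l2.length = l1.length := by omega
    have hd : l1.drop (l2.length - 0) = [] := List.drop_eq_nil_of_le (by omega)
    rw [if_pos h, PySem.List.slice_from_natCast]
    simp [hmin]
    omega
  · have hmin : min l1.length l2.length = l2.length := by omega
    have hd : l2.drop l2.length = [] := List.drop_eq_nil_of_le le_rfl
    rw [if_neg h]
    simp [hmin, hd]

lemma pyGetD_pred (l : List Char) (i : Nat) (h1 : 1 ≤ i) (h2 : i ≤ l.length) :
    PySem.List.pyGetD l ((i : Int) - 1) ' ' = l[i - 1]'(by omega) := by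
  have : ((i : Int) - 1) = ((i - 1 : Nat) : Int) := by omega
  rw [this, PySem.List.pyGetD_natCast]
  simp [List.getD, List.getElem?_eq_getElem (show i - 1 < l.length by omega)]

lemma mism_snoc_right (x y : List Char) (c : Char) (h : x.length ≤ y.length) :
    mism x (y ++ [c]) = mism x y ++ [String.singleton c] := by
  have hzip : x.zip (y ++ [c]) = x.zip y := by
    rw [← zip_take_of_le x (y ++ [c]) y.length h, List.take_left']
    rfl
  unfold mism
  rw [hzip]
  have hmin1 : min x.length (y ++ [c]).length = x.length := by simp; omega
  have hmin2 : min x.length y.length = x.length := by omega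
  rw [hmin1, hmin2, List.drop_append_of_le_length h]
  simp

lemma mism_snoc_left (x y : List Char) (c : Char) (h : y.length ≤ x.length) :
    mism (x ++ [c]) y = mism x y ++ [String.singleton c] := by
  have hzip : (x ++ [c]).zip y = x.zip y := by
    rw [← zip_take_of_le' (x ++ [c]) y x.length h, List.take_left']
    rfl
  unfold mism
  rw [hzip]
  have hmin1 : min (x ++ [c]).length y.length = y.length := by simp; omega
  have hmin2 : min x.length y.length = y.length := by omega
  rw [hmin1, hmin2, List.drop_append_of_le_length h]
  simp

lemma mism_snoc_both (x y : List Char) (c d : Char) (h : x.length = y.length) :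
    mism (x ++ [c]) (y ++ [d])
      = mism x y ++ (if c ≠ d then [String.singleton c] else []) := by
  unfold mism
  rw [List.zip_append h]
  have hmin1 : min (x ++ [c]).length (y ++ [d]).length = x.length + 1 := by simp; omega
  have hmin2 : min x.length y.length = x.length := by omega
  rw [hmin1, hmin2]
  have hx : (x ++ [c]).drop (x.length + 1) = [] := List.drop_eq_nil_of_le (by simp)
  have hy : (y ++ [d]).drop (x.length + 1) = [] := List.drop_eq_nil_of_le (by simp; omega)
  have hx2 : x.drop x.length = [] := by simp
  have hy2 : y.drop x.length = [] := List.drop_eq_nil_of_le (by omega)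
  rw [hx, hy, hx2, hy2, List.filter_append]
  by_cases hc : c = d <;> simp [hc]

-- loop invariant of B's backward loop: state (i, j) holds the answer for the prefixes of length i and j
lemma loopB (a b : List Char) (i j : Nat) (out : List String)
    (hi : i ≤ a.length) (hj : j ≤ b.length) :
    altLoop a b i j out = out ++ (mism (a.take i) (b.take j)).reverse := by
  induction i, j, out using altLoop.induct a b with
  | case1 i j out hlt ih =>
    rw [altLoop, if_pos hlt, ih (by omega) (by omega),
        pyGetD_pred b j (by omega) hj]
    have htj : b.take j = b.take (j - 1) ++ [b[j - 1]'(by omega)] := by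
      conv_lhs => rw [show j = (j - 1) + 1 by omega]
      exact List.take_succ_eq_append_getElem (by omega)
    rw [htj, mism_snoc_right _ _ _ (by simp; omega)]
    simp
  | case2 i j out h1 hlt ih =>
    rw [altLoop, if_neg h1, if_pos hlt, ih (by omega) (by omega),
        pyGetD_pred a i (by omega) hi]
    have hti : a.take i = a.take (i - 1) ++ [a[i - 1]'(by omega)] := by
      conv_lhs => rw [show i = (i - 1) + 1 by omega]
      exact List.take_succ_eq_append_getElem (by omega)
    rw [hti, mism_snoc_left _ _ _ (by simp; omega)]
    simp
  | case3 i j out h1 h2 hpos ih =>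
    have hij : i = j := by omega
    subst hij
    have ih' := ih (by omega) (by omega)
    simp only [dite_eq_ite] at ih'
    rw [altLoop, if_neg h1, if_neg h2, if_pos hpos, ih',
        pyGetD_pred a i (by omega) hi, pyGetD_pred b i (by omega) (by omega)]
    have hti : a.take i = a.take (i - 1) ++ [a[i - 1]'(by omega)] := by
      conv_lhs => rw [show i = (i - 1) + 1 by omega]
      exact List.take_succ_eq_append_getElem (by omega)
    have htj : b.take i = b.take (i - 1) ++ [b[i - 1]'(by omega)] := by
      conv_lhs => rw [show i = (i - 1) + 1 by omega]
      exact List.take_succ_eq_append_getElem (by omega)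
    rw [hti, htj, mism_snoc_both _ _ _ _ (by simp; omega)]
    by_cases hc : a[i - 1]'(by omega) = b[i - 1]'(by omega) <;>
      simp [hc]
  | case4 i j out h1 h2 h3 =>
    have hi0 : i = 0 := by omega
    have hj0 : j = 0 := by omega
    rw [altLoop, if_neg h1, if_neg h2, if_neg h3]
    simp [hi0, hj0, mism]

lemma B_eq_mism (a b : List Char) :
    (altLoop a b a.length b.length []).reverse = mism a b := by
  rw [loopB a b a.length b.length [] le_rfl le_rfl]
  simp

-- ===== VERDICT (by name: the statement is the Claim_ definition above) =====
theorem compare_letters_py_spec : Claim_equal_compare_letters_py := by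
  intro text1 text2 _
  unfold Spec_compare_letters_py compare_letters_py compare_letters_py_alt
  rw [B_eq_mism]
  exact A_eq_mism _ _
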